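-- pv_equiv track=rewrite | github.com/kuolius/TicTacToe-AI | memedit.py | isXOD
-- ===== SOURCE A (Python) =====
-- def min(a,b):
-- 	if a<b:
-- 		return a
-- 	else:
-- 		return b
--
-- def findStar(matrix):
-- 	for i in range(len(matrix)):
-- 		for j in range(len(matrix[i])):
-- 			if matrix[i][j]=="*":
-- 				return [i,j]
--
-- def isXOD(matrix):
-- 	center=findStar(matrix)
-- 	o=False
-- 	for i in range(1,min(center[0]+1,len(matrix[center[0]])-center[1])):
-- 		if matrix[center[0]-i][center[1]+i]=="x":
-- 			o=True
-- 	for i in range(1,min(len(matrix)-center[0],center[1]+1)):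
-- 		if matrix[center[0]+i][center[1]-i]=="x":
-- 			o=True
-- 	return o
-- ===== SOURCE B (Python) =====
-- def isXOD(matrix):
--     star_diag = None
--     x_diags = set()
--     for i, row in enumerate(matrix):
--         for j, ch in enumerate(row):
--             if ch == "x":
--                 x_diags.add(i + j)
--             elif ch == "*" and star_diag is None:
--                 star_diag = i + j
--     if star_diag is None:
--         return False
--     return star_diag in x_diags
-- ===== Notes on version B (the rewrite author's own statement) =====
-- stated objective: alternative
-- what changed: A first locates the star, then walks the anti-diagonal in two bounded directional index loops; B never walks from the star: one row-major pass builds a hash set of all anti-diagonal sums i+j containing an 'x' while recording the first star's sum, and answers by a single set-membership test.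
-- outside the precondition, e.g. on isXOD([['.', '.', 'x'], ['.', '*']]): A returns False, B returns True; on isXOD([['.', '*'], []]): A raises IndexError, B returns False
import Mathlib
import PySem

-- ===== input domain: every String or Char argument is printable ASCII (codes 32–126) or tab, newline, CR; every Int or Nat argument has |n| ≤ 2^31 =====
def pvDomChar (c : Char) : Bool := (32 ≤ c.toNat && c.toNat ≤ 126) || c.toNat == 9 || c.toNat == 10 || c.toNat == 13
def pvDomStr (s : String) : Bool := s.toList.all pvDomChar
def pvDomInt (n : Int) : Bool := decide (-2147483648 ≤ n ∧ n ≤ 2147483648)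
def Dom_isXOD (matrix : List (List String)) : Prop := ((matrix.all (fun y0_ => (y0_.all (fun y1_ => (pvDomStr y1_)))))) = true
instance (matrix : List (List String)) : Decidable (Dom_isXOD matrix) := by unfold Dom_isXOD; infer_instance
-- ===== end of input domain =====

-- B drops A's find-the-star-then-walk approach: one row-major pass collects the set of
-- anti-diagonal sums i+j that carry an 'x' and the first star's sum, then answers by a
-- single set-membership test (objective: alternative).

-- ===== PORT A =====
-- helper of Source A: inner loop of findStar (scan one row for "*", returning its column)
def findStarRow (row : List String) (j : Nat) : Option Nat :=
  match row with
  | [] => none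
  | c :: cs => if c = "*" then some j else findStarRow cs (j + 1)

-- helper of Source A: findStar's outer loop over the rows
def findStarAux (rows : List (List String)) (i : Nat) : Option (Nat × Nat) :=
  match rows with
  | [] => none
  | r :: rs =>
    match findStarRow r 0 with
    | some j => some (i, j)
    | none => findStarAux rs (i + 1)

def findStar (matrix : List (List String)) : Option (Nat × Nat) := findStarAux matrix 0

-- literal port of A's isXOD: the two directional loops over range(1, min …).
-- On `none` Python raises TypeError (excluded by Pre_); the `getD` accesses are exact on
-- Pre_ (rectangular board), where every visited index is in range.
def isXOD (matrix : List (List String)) : Bool :=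
  match findStar matrix with
  | none => false
  | some (r, c) =>
    let b1 : Int := min ((r : Int) + 1) (((matrix.getD r []).length : Int) - (c : Int))
    let o1 := (PySem.List.pyRange 1 b1 1).foldl
      (fun o i => if (matrix.getD (r - i.toNat) []).getD (c + i.toNat) "" = "x" then true else o) false
    let b2 : Int := min ((matrix.length : Int) - (r : Int)) ((c : Int) + 1)
    (PySem.List.pyRange 1 b2 1).foldl
      (fun o i => if (matrix.getD (r + i.toNat) []).getD (c - i.toNat) "" = "x" then true else o) o1

-- ===== PORT B =====
-- body of Source B's inner loop over one row (i = row index, q = (cell, column))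
def bStep (i : Nat) (st : Option Nat × PySem.Set Nat) (q : String × Nat) :
    Option Nat × PySem.Set Nat :=
  if q.1 = "x" then (st.1, PySem.Set.add st.2 (i + q.2))
  else if q.1 = "*" ∧ st.1 = none then (some (i + q.2), st.2)
  else st

-- body of Source B's outer loop (p = (row, row index))
def bRow (st : Option Nat × PySem.Set Nat) (p : List String × Nat) :
    Option Nat × PySem.Set Nat :=
  p.1.zipIdx.foldl (bStep p.2) st

-- literal port of Source B: one pass building (star_diag, x_diags), then membership
def isXOD_alt (matrix : List (List String)) : Bool :=
  let st := matrix.zipIdx.foldl bRow ((none : Option Nat), (PySem.Set.empty : PySem.Set Nat))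
  match st.1 with
  | none => false
  | some s => PySem.Set.contains st.2 s

-- ===== PRECONDITION & SPEC =====
-- Pre_ excludes matrices with no "*" (A raises TypeError) and irregular boards on which
-- A's walk bounds, computed from the star row's length, raise IndexError or skip an
-- existing anti-diagonal cell of a longer row; every rectangular board satisfies it.
def Pre_isXOD (matrix : List (List String)) : Prop :=
  (∃ row ∈ matrix, "*" ∈ row) ∧
  (∀ r < matrix.length, ∀ c < (matrix.getD r []).length,
    (matrix.getD r []).getD c "" = "*" →
      ∀ k < r, ((r + c) - k < (matrix.getD k []).length ↔
                (r + c) - k < (matrix.getD r []).length)) ∧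
  (∀ r < matrix.length, ∀ c < (matrix.getD r []).length,
    (matrix.getD r []).getD c "" = "*" →
      ∀ k < matrix.length, r < k → k ≤ r + c →
        (r + c) - k < (matrix.getD k []).length)
instance (matrix : List (List String)) : Decidable (Pre_isXOD matrix) := by
  unfold Pre_isXOD
  exact instDecidableAnd (dq := instDecidableAnd (dp := Nat.decidableBallLT _ _) (dq := Nat.decidableBallLT _ _))

def pvWitness_isXOD : List (List String) := [["*", "x"], [".", "."]]

def Spec_isXOD (matrix : List (List String)) (out : Bool) : Prop := out = isXOD_alt matrix
instance (matrix : List (List String)) (out : Bool) : Decidable (Spec_isXOD matrix out) := by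
  unfold Spec_isXOD; infer_instance

-- ===== CLAIM (what is proved, stated in full; the proofs are below) =====
def Claim_equal_isXOD : Prop :=
  ∀ (matrix : List (List String)), Dom_isXOD matrix → Pre_isXOD matrix →
    Spec_isXOD matrix (isXOD matrix)

-- ===== LEMMAS AND PROOFS =====

-- a row that contains "*" makes findStarRow succeed
lemma findStarRow_isSome (row : List String) (j : Nat) (h : "*" ∈ row) :
    (findStarRow row j).isSome := by
  induction row generalizing j with
  | nil => simp at h
  | cons a l ih =>
    simp only [findStarRow]
    rcases List.mem_cons.mp h with h | h
    · simp [h.symm]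
    · split
      · simp
      · exact ih (j + 1) h

-- findStarRow finds a "*" at the reported column
lemma findStarRow_spec (row : List String) (j k : Nat) (h : findStarRow row j = some k) :
    j ≤ k ∧ k - j < row.length ∧ row.getD (k - j) "" = "*" := by
  induction row generalizing j with
  | nil => simp [findStarRow] at h
  | cons a l ih =>
    simp only [findStarRow] at h
    split at h
    · rename_i ha
      cases h
      simp [ha]
    · obtain ⟨h1, h2, h3⟩ := ih (j + 1) h
      refine ⟨by omega, by simp; omega, ?_⟩
      have : k - j = (k - (j + 1)) + 1 := by omega
      rw [this]
      simpa using h3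

lemma findStarAux_isSome (rows : List (List String)) (i : Nat)
    (h : ∃ row ∈ rows, "*" ∈ row) : (findStarAux rows i).isSome := by
  induction rows generalizing i with
  | nil => simp at h
  | cons a l ih =>
    simp only [findStarAux]
    rcases h with ⟨row, hmem, hstar⟩
    rcases List.mem_cons.mp hmem with rfl | hmem
    · have := findStarRow_isSome row 0 hstar
      cases hr : findStarRow row 0 with
      | none => rw [hr] at this; simp at this
      | some j => simp
    · cases hr : findStarRow a 0 with
      | none => exact ih (i + 1) ⟨row, hmem, hstar⟩
      | some j => simp

lemma findStarAux_spec (rows : List (List String)) (i r c : Nat)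
    (h : findStarAux rows i = some (r, c)) :
    i ≤ r ∧ r - i < rows.length ∧ findStarRow (rows.getD (r - i) []) 0 = some c := by
  induction rows generalizing i with
  | nil => simp [findStarAux] at h
  | cons a l ih =>
    simp only [findStarAux] at h
    split at h
    · rename_i j hr
      cases h
      simpa [Nat.sub_self] using hr
    · obtain ⟨h1, h2, h3⟩ := ih (i + 1) h
      refine ⟨by omega, by simp; omega, ?_⟩
      have : r - i = (r - (i + 1)) + 1 := by omega
      rw [this]
      simpa using h3

-- from a successful findStar: bounds and the star cell
lemma findStar_spec (matrix : List (List String)) (r c : Nat)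
    (h : findStar matrix = some (r, c)) :
    r < matrix.length ∧ c < (matrix.getD r []).length ∧
      (matrix.getD r []).getD c "" = "*" := by
  obtain ⟨_, h2, h3⟩ := findStarAux_spec matrix 0 r c h
  obtain ⟨_, hc, hcell⟩ := findStarRow_spec _ 0 c h3
  simp only [Nat.sub_zero] at h2 h3 hc hcell ⊢
  exact ⟨h2, by simpa using hc, by simpa using hcell⟩

-- A's accumulator loop is an `any`
lemma foldl_if_any (l : List Int) (P : Int → Prop) [DecidablePred P] (b : Bool) :
    l.foldl (fun o i => if P i then true else o) b = (b || l.any (fun i => decide (P i))) := by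
  induction l generalizing b with
  | nil => simp
  | cons a t ih =>
    simp only [List.foldl_cons, List.any_cons, ih]
    by_cases h : P a <;> simp [h]

-- B's inner loop: the star component becomes the first "*" of the row (if still unset)
lemma bRow_fst (row : List String) (i j0 : Nat) (st : Option Nat × PySem.Set Nat) :
    ((row.zipIdx j0).foldl (bStep i) st).1 =
      match st.1 with
      | some s => some s
      | none => (findStarRow row j0).map (fun j => i + j) := by
  induction row generalizing j0 st with
  | nil => cases h : st.1 <;> simp [findStarRow, h]
  | cons a l ih =>
    simp only [List.zipIdx_cons, List.foldl_cons]
    rw [ih]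
    by_cases hx : a = "x"
    · have hns : a ≠ "*" := by simp [hx]
      simp [bStep, hx, findStarRow]
    · by_cases hs : a = "*"
      · cases h : st.1 with
        | none => simp [bStep, hs, h, findStarRow]
        | some s => simp [bStep, hs, h]
      · simp [bStep, hx, hs, findStarRow]

-- B's inner loop: membership in the x-diagonal set
lemma bRow_mem (row : List String) (i j0 : Nat) (st : Option Nat × PySem.Set Nat) (v : Nat) :
    v ∈ ((row.zipIdx j0).foldl (bStep i) st).2 ↔
      v ∈ st.2 ∨ ∃ j, ∃ _ : j < row.length, row.getD j "" = "x" ∧ i + (j0 + j) = v := by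
  induction row generalizing j0 st with
  | nil => simp
  | cons a l ih =>
    simp only [List.zipIdx_cons, List.foldl_cons]
    rw [ih]
    have step2 : (bStep i st (a, j0)).2 =
        if a = "x" then PySem.Set.add st.2 (i + j0) else st.2 := by
      by_cases hx : a = "x"
      · simp [bStep, hx]
      · by_cases hs : a = "*" ∧ st.1 = none <;> simp [bStep, hx, hs]
    constructor
    · rintro (hm | ⟨j, hj, hxx, hv⟩)
      · rw [step2] at hm
        by_cases hx : a = "x"
        · rw [if_pos hx, PySem.Set.mem_add] at hm
          rcases hm with hm | hm
          · exact Or.inl hm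
          · exact Or.inr ⟨0, by simp, by simp [hx], by omega⟩
        · rw [if_neg hx] at hm; exact Or.inl hm
      · exact Or.inr ⟨j + 1, by simpa using Nat.succ_lt_succ hj, by simpa using hxx, by omega⟩
    · rintro (hm | ⟨j, hj, hxx, hv⟩)
      · left
        rw [step2]
        by_cases hx : a = "x"
        · rw [if_pos hx, PySem.Set.mem_add]; exact Or.inl hm
        · rw [if_neg hx]; exact hm
      · cases j with
        | zero =>
          left
          simp only [List.getD_cons_zero] at hxx
          rw [step2, if_pos hxx, PySem.Set.mem_add]
          right; omega
        | succ j' =>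
          right
          exact ⟨j', by simpa using hj, by simpa using hxx, by omega⟩

-- B's outer loop: the star component is findStarAux's first star's diagonal sum
lemma bFold_fst (rows : List (List String)) (i0 : Nat) (st : Option Nat × PySem.Set Nat) :
    ((rows.zipIdx i0).foldl bRow st).1 =
      match st.1 with
      | some s => some s
      | none => (findStarAux rows i0).map (fun rc => rc.1 + rc.2) := by
  induction rows generalizing i0 st with
  | nil => cases h : st.1 <;> simp [findStarAux, h]
  | cons a l ih =>
    simp only [List.zipIdx_cons, List.foldl_cons]
    rw [ih]
    have h1 : (bRow st (a, i0)).1 =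
        match st.1 with
        | some s => some s
        | none => (findStarRow a 0).map (fun j => i0 + j) := bRow_fst a i0 0 st
    cases h : st.1 with
    | some s => simp [h1, h]
    | none =>
      cases hr : findStarRow a 0 with
      | none => simp [h1, h, hr, findStarAux]
      | some j => simp [h1, h, hr, findStarAux]

-- B's outer loop: membership in the x-diagonal set over the whole matrix
lemma bFold_mem (rows : List (List String)) (i0 : Nat) (st : Option Nat × PySem.Set Nat)
    (v : Nat) :
    v ∈ ((rows.zipIdx i0).foldl bRow st).2 ↔
      v ∈ st.2 ∨ ∃ k, ∃ _ : k < rows.length, ∃ j, ∃ _ : j < (rows.getD k []).length,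
        (rows.getD k []).getD j "" = "x" ∧ (i0 + k) + j = v := by
  induction rows generalizing i0 st with
  | nil => simp
  | cons a l ih =>
    simp only [List.zipIdx_cons, List.foldl_cons]
    rw [ih]
    have hm : v ∈ (bRow st (a, i0)).2 ↔
        v ∈ st.2 ∨ ∃ j, ∃ _ : j < a.length, a.getD j "" = "x" ∧ i0 + (0 + j) = v :=
      bRow_mem a i0 0 st v
    rw [hm]
    constructor
    · rintro ((h | ⟨j, hj, hx, hv⟩) | ⟨k, hk, j, hj, hx, hv⟩)
      · exact Or.inl h
      · exact Or.inr ⟨0, by simp, j, by simpa using hj, by simpa using hx, by omega⟩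
      · exact Or.inr ⟨k + 1, by simpa using Nat.succ_lt_succ hk,
          j, by simpa using hj, by simpa using hx, by omega⟩
    · rintro (h | ⟨k, hk, j, hj, hx, hv⟩)
      · exact Or.inl (Or.inl h)
      · cases k with
        | zero =>
          exact Or.inl (Or.inr ⟨j, by simpa using hj, by simpa using hx, by omega⟩)
        | succ k' =>
          exact Or.inr ⟨k', by simpa using hk, j, by simpa using hj,
            by simpa using hx, by omega⟩

-- ===== VERDICT (by name: the statement is the Claim_ definition above) =====
theorem isXOD_spec : Claim_equal_isXOD := by
  intro matrix _ hpre
  obtain ⟨hstar, hshape1, hshape2⟩ := hpre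
  unfold Spec_isXOD isXOD isXOD_alt
  have hfst := bFold_fst matrix 0 ((none : Option Nat), (PySem.Set.empty : PySem.Set Nat))
  cases hfs : findStar matrix with
  | none =>
    have := findStarAux_isSome matrix 0 hstar
    unfold findStar at hfs
    simp [hfs] at this
  | some rc =>
    obtain ⟨r, c⟩ := rc
    dsimp only
    unfold findStar at hfs
    rw [hfs] at hfst
    simp only [Option.map_some] at hfst
    rw [hfst]
    dsimp only
    obtain ⟨hr, hc, hcell⟩ := findStar_spec matrix r c (by unfold findStar; exact hfs)
    have hup := hshape1 r hr c hc hcell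
    have hdown := hshape2 r hr c hc hcell
    rw [foldl_if_any, foldl_if_any, Bool.false_or]
    rw [Bool.eq_iff_iff, PySem.Set.contains_iff,
      bFold_mem matrix 0 ((none : Option Nat), (PySem.Set.empty : PySem.Set Nat)) (r + c)]
    simp only [Bool.or_eq_true, List.any_eq_true, PySem.List.mem_pyRange_one,
      decide_eq_true_eq, PySem.Set.empty, List.not_mem_nil, false_or]
    constructor
    · rintro (⟨i, ⟨h1, h2⟩, hx⟩ | ⟨i, ⟨h1, h2⟩, hx⟩)
      · -- up-right walk: row r - i, column c + i
        have hk : r - i.toNat < matrix.length := by omega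
        have hkr : r - i.toNat < r := by omega
        have := (hup _ hkr).mpr (by omega)
        refine ⟨r - i.toNat, hk, c + i.toNat, by omega, hx, by omega⟩
      · -- down-left walk: row r + i, column c - i
        have hk : r + i.toNat < matrix.length := by omega
        have := hdown (r + i.toNat) hk (by omega) (by omega)
        refine ⟨r + i.toNat, hk, c - i.toNat, by omega, hx, by omega⟩
    · rintro ⟨k, hk, j, hj, hx, hv⟩
      simp only [Nat.zero_add] at hv
      rcases Nat.lt_trichotomy k r with hkr | hkr | hkr
      · -- above the star: left disjunct with i = r - k
        have hlt : (r + c) - k < (matrix.getD r []).length := (hup k hkr).mp (by omega)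
        refine Or.inl ⟨((r - k : Nat) : Int), ⟨by omega, by omega⟩, ?_⟩
        have ht : ((r - k : Nat) : Int).toNat = r - k := by omega
        rw [ht]
        have h1 : r - (r - k) = k := by omega
        have h2 : c + (r - k) = j := by omega
        rw [h1, h2]; exact hx
      · -- the star cell itself is "*", never "x"
        exfalso
        subst hkr
        have : j = c := by omega
        subst this
        rw [hx] at hcell
        simp at hcell
      · -- below the star: right disjunct with i = k - r
        refine Or.inr ⟨((k - r : Nat) : Int), ⟨by omega, by omega⟩, ?_⟩
        have ht : ((k - r : Nat) : Int).toNat = k - r := by omega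
        rw [ht]
        have h1 : r + (k - r) = k := by omega
        have h2 : c - (k - r) = j := by omega
        rw [h1, h2]; exact hx
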